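-- pv_equiv track=rewrite | github.com/Kvkthecreator/yarnnnn | api/services/workspace.py | get_agent_slug
-- ===== SOURCE A (Python) =====
-- def get_agent_slug(agent: dict) -> str:
--     """
--     Derive a filesystem-safe slug for an agent.
--     Uses title if available, falls back to ID.
--     """
--     title = agent.get("title", "")
--     agent_id = agent.get("id", "unknown")
--
--     if title:
--         # Lowercase, replace spaces/special chars with hyphens
--         slug = title.lower().strip()
--         slug = "".join(c if c.isalnum() or c == "-" else "-" for c in slug)
--         slug = "-".join(part for part in slug.split("-") if part)  # Remove consecutive hyphens
--         return slug[:50]  # Cap length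
--
--     return str(agent_id)[:36]
-- ===== SOURCE B (Python) =====
-- def get_agent_slug(agent: dict) -> str:
--     """
--     Derive a filesystem-safe slug for an agent.
--     Single pass: emit alnum chars, collapse any separator run into one
--     hyphen (never leading), then drop a trailing hyphen.
--     """
--     title = agent.get("title", "")
--     if title:
--         out = []
--         for c in title.lower().strip():
--             if c.isalnum():
--                 out.append(c)
--             elif out and out[-1] != "-":
--                 out.append("-")
--         if out and out[-1] == "-":
--             out.pop()
--         return "".join(out)[:50]
--     return str(agent.get("id", "unknown"))[:36]
-- ===== Notes on version B (the rewrite author's own statement) =====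
-- stated objective: alternative
-- what changed: Replaces A's three-stage pipeline (char-map to hyphens, split on '-', filter empties, re-join) with a single left-to-right pass that emits alnum chars and at most one hyphen per separator run (never leading), dropping one trailing hyphen at the end.
import Mathlib
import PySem

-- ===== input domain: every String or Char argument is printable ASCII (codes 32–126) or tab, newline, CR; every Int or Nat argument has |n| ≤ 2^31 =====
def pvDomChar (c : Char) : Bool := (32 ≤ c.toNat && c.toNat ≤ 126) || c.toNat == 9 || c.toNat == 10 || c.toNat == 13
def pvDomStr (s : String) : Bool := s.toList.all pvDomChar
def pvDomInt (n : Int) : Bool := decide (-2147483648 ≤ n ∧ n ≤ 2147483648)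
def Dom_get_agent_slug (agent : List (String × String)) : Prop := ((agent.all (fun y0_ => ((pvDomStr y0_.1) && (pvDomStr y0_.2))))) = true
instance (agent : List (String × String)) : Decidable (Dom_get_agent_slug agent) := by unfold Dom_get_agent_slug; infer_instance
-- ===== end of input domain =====

-- B replaces A's three-stage pipeline (char-map, split on '-', filter, join) by one
-- left-to-right pass that collapses separator runs as it goes (objective: alternative).

-- ===== PORT A =====
-- the per-character mapping of A's comprehension: c if c.isalnum() or c == '-' else '-'
def pvMapA (c : Char) : Char := if PySem.Chars.isalnum c || c == '-' then c else '-'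

def get_agent_slug (agent : List (String × String)) : String :=
  let title := PySem.Dict.getD (PySem.Dict.mk agent) "title" ""
  let agent_id := PySem.Dict.getD (PySem.Dict.mk agent) "id" "unknown"
  if title ≠ "" then
    let slug := PySem.Chars.strip (PySem.Chars.lower title.toList)
    let slug2 := slug.map pvMapA
    let slug3 := PySem.Chars.join ['-']
      ((PySem.Chars.splitOn slug2 ['-']).filter (fun p => !p.isEmpty))
    String.ofList (PySem.List.slice slug3 none (some 50))
  else
    String.ofList (PySem.List.slice agent_id.toList none (some 36))

-- ===== PORT B =====
-- the loop body of Source B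
def pvStep (acc : List Char) (c : Char) : List Char :=
  if PySem.Chars.isalnum c then acc ++ [c]
  else if acc ≠ [] ∧ acc.getLast? ≠ some '-' then acc ++ ['-']
  else acc

def get_agent_slug_alt (agent : List (String × String)) : String :=
  let title := PySem.Dict.getD (PySem.Dict.mk agent) "title" ""
  if title ≠ "" then
    let out := (PySem.Chars.strip (PySem.Chars.lower title.toList)).foldl pvStep []
    let out2 := if out.getLast? = some '-' then out.dropLast else out
    String.ofList (PySem.List.slice out2 none (some 50))
  else
    String.ofList (PySem.List.slice (PySem.Dict.getD (PySem.Dict.mk agent) "id" "unknown").toList none (some 36))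

-- ===== PRECONDITION & SPEC =====
def Spec_get_agent_slug (agent : List (String × String)) (out : String) : Prop := out = get_agent_slug_alt agent
instance (agent : List (String × String)) (out : String) : Decidable (Spec_get_agent_slug agent out) := by unfold Spec_get_agent_slug; infer_instance

-- ===== CLAIM (what is proved, stated in full; the proofs are below) =====
def Claim_equal_get_agent_slug : Prop := ∀ (agent : List (String × String)), Dom_get_agent_slug agent → Spec_get_agent_slug agent (get_agent_slug agent)

-- ===== LEMMAS AND PROOFS =====

-- proof-side vocabulary
def pvSegs (cs : List Char) : List (List Char) :=
  List.splitOnP (fun c => !PySem.Chars.isalnum c) cs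

def pvFjoin (ts : List (List Char)) : List Char :=
  (ts.filter (fun p => !p.isEmpty)).flatMap (fun s => '-' :: s)

def pvG : List (List Char) → List Char
  | [] => []
  | h :: t => if h.isEmpty then pvG t else h ++ pvFjoin t

def pvStrip1 (x : List Char) : List Char :=
  if x.getLast? = some '-' then x.dropLast else x

def pvEmit : Bool → List Char → List Char
  | _, [] => []
  | b, c :: cs =>
    if PySem.Chars.isalnum c then c :: pvEmit true cs
    else if b then '-' :: pvEmit false cs
    else pvEmit false cs

def pvK (cs : List Char) : List Char :=
  match pvSegs cs with
  | [] => []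
  | h :: t => h ++ pvFjoin t

lemma pvAlnum_ne_hyphen {c : Char} (h : PySem.Chars.isalnum c = true) : c ≠ '-' := by
  intro he; subst he; exact absurd h (by decide)

lemma pvFoldl_emit (cs : List Char) : ∀ acc : List Char,
    List.foldl pvStep acc cs = acc ++ pvEmit (decide (acc ≠ [] ∧ acc.getLast? ≠ some '-')) cs := by
  induction cs with
  | nil => intro acc; simp [pvEmit]
  | cons c cs ih =>
    intro acc
    by_cases hc : PySem.Chars.isalnum c = true
    · have hstep : pvStep acc c = acc ++ [c] := by simp [pvStep, hc]
      have hlast : (acc ++ [c]).getLast? = some c := by simp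
      have : List.foldl pvStep acc (c :: cs) = List.foldl pvStep (acc ++ [c]) cs := by
        simp [List.foldl, hstep]
      rw [this, ih]
      have hdec : decide ((acc ++ [c]) ≠ [] ∧ (acc ++ [c]).getLast? ≠ some '-') = true := by
        simp [hlast, pvAlnum_ne_hyphen hc]
      rw [hdec]
      simp [pvEmit, hc]
    · by_cases hb : acc ≠ [] ∧ acc.getLast? ≠ some '-'
      · have hstep : pvStep acc c = acc ++ ['-'] := by simp [pvStep, hc, hb]
        have : List.foldl pvStep acc (c :: cs) = List.foldl pvStep (acc ++ ['-']) cs := by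
          simp [List.foldl, hstep]
        rw [this, ih]
        have hdec : decide ((acc ++ ['-']) ≠ [] ∧ (acc ++ ['-']).getLast? ≠ some '-') = false := by
          simp
        rw [hdec]
        simp [pvEmit, hc, hb]
      · have hstep : pvStep acc c = acc := by
          unfold pvStep; rw [if_neg (by simp [hc]), if_neg hb]
        have : List.foldl pvStep acc (c :: cs) = List.foldl pvStep acc cs := by
          simp [List.foldl, hstep]
        rw [this, ih]
        simp [pvEmit, hc, hb]

lemma pvStrip1_cons_of_ne_nil (c : Char) {y : List Char} (hy : y ≠ []) :
    pvStrip1 (c :: y) = c :: pvStrip1 y := by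
  cases y with
  | nil => exact absurd rfl hy
  | cons a l =>
    unfold pvStrip1
    rw [List.getLast?_cons_cons]
    split_ifs <;> simp [List.dropLast]

lemma pvStrip1_cons_alnum {c : Char} (hc : PySem.Chars.isalnum c = true) (y : List Char) :
    pvStrip1 (c :: y) = c :: pvStrip1 y := by
  cases y with
  | nil => simp [pvStrip1, pvAlnum_ne_hyphen hc]
  | cons a l => exact pvStrip1_cons_of_ne_nil _ (by simp)

lemma pvFjoin_G (ts : List (List Char)) :
    pvFjoin ts = if pvG ts = [] then [] else '-' :: pvG ts := by
  induction ts with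
  | nil => simp [pvFjoin, pvG]
  | cons h t ih =>
    by_cases hh : h.isEmpty
    · have h0 : h = [] := by simpa [List.isEmpty_iff] using hh
      subst h0
      simp [pvFjoin, pvG] at ih ⊢
      exact ih
    · have hne : h ≠ [] := by simpa [List.isEmpty_iff] using hh
      simp [pvFjoin, pvG, hh, hne]

lemma pvMain (cs : List Char) :
    pvStrip1 (pvEmit false cs) = pvG (pvSegs cs) ∧
    pvStrip1 (pvEmit true cs) = pvK cs ∧
    (pvEmit false cs = [] ↔ pvG (pvSegs cs) = []) := by
  induction cs with
  | nil =>
    refine ⟨by simp [pvEmit, pvStrip1, pvSegs, pvG], by simp [pvEmit, pvStrip1, pvK, pvSegs, pvFjoin], by simp [pvEmit, pvSegs, pvG]⟩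
  | cons c cs ih =>
    obtain ⟨ih1, ih2, ih3⟩ := ih
    obtain ⟨h, t, hseg⟩ : ∃ h t, pvSegs cs = h :: t := by
      rcases hx : pvSegs cs with _ | ⟨h, t⟩
      · exact absurd hx (List.splitOnP_ne_nil _ _)
      · exact ⟨h, t, rfl⟩
    by_cases hc : PySem.Chars.isalnum c = true
    · have hsegc : pvSegs (c :: cs) = (c :: h) :: t := by
        simp [pvSegs, List.splitOnP_cons, hc, pvSegs] at hseg ⊢
        rw [hseg]; rfl
      have hK : pvK cs = h ++ pvFjoin t := by simp [pvK, hseg]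
      have hGc : pvG (pvSegs (c :: cs)) = c :: (h ++ pvFjoin t) := by
        simp [hsegc, pvG]
      have hKc : pvK (c :: cs) = c :: (h ++ pvFjoin t) := by
        simp [pvK, hsegc]
      refine ⟨?_, ?_, ?_⟩
      · simp only [pvEmit, hc, if_pos]
        rw [pvStrip1_cons_alnum hc, ih2, hK, hGc]
      · simp only [pvEmit, hc, if_pos]
        rw [pvStrip1_cons_alnum hc, ih2, hK, hKc]
      · constructor
        · intro h'; simp [pvEmit, hc] at h'
        · intro h'; rw [hGc] at h'; simp at h'
    · have hsegc : pvSegs (c :: cs) = [] :: pvSegs cs := by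
        simp [pvSegs, List.splitOnP_cons, hc]
      have hGc : pvG (pvSegs (c :: cs)) = pvG (pvSegs cs) := by
        simp [hsegc, pvG]
      have hKc : pvK (c :: cs) = pvFjoin (pvSegs cs) := by
        simp [pvK, hsegc, pvFjoin]
      have heF : pvEmit false (c :: cs) = pvEmit false cs := by simp [pvEmit, hc]
      have heT : pvEmit true (c :: cs) = '-' :: pvEmit false cs := by simp [pvEmit, hc]
      refine ⟨?_, ?_, ?_⟩
      · rw [heF, hGc]; exact ih1
      · rw [heT, hKc, pvFjoin_G]
        by_cases hz : pvEmit false cs = []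
        · have : pvG (pvSegs cs) = [] := ih3.mp hz
          simp [hz, this, pvStrip1]
        · have hgz : pvG (pvSegs cs) ≠ [] := fun hg => hz (ih3.mpr hg)
          rw [pvStrip1_cons_of_ne_nil _ hz, ih1]
          simp [hgz]
      · rw [heF, hGc]; exact ih3

-- A's splitOn with single-character separator '-' is List.splitOnP (· == '-')
lemma pvGo (fuel : Nat) : ∀ (l cur : List Char) (acc : List (List Char)), l.length < fuel →
    PySem.Chars.splitOn.go ['-'] fuel l cur acc =
      acc.reverse ++ (List.splitOnP (fun c => c == '-') l).modifyHead (fun s => cur.reverse ++ s) := by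
  induction fuel with
  | zero => intro l cur acc h; omega
  | succ fuel ih =>
    intro l cur acc h
    cases l with
    | nil =>
      rw [PySem.Chars.splitOn.go.eq_def]
      simp [List.splitOnP_nil]
    | cons c rest =>
      by_cases hc : c = '-'
      · subst hc
        have hpre : List.isPrefixOf ['-'] ('-' :: rest) = true := by simp [List.isPrefixOf]
        rw [PySem.Chars.splitOn.go.eq_def]
        simp only [hpre, if_pos]
        rw [show List.drop (['-'] : List Char).length ('-' :: rest) = rest from rfl]
        rw [ih rest [] _ (by simpa using Nat.lt_of_succ_lt_succ h)]
        rcases hx : List.splitOnP (fun c => c == '-') rest with _ | ⟨h0, t0⟩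
        · exact absurd hx (List.splitOnP_ne_nil _ _)
        · simp [List.splitOnP_cons, hx]
      · have hpre : List.isPrefixOf ['-'] (c :: rest) = false := by
          simp [List.isPrefixOf]; exact fun hh => absurd hh.symm hc
        rw [PySem.Chars.splitOn.go.eq_def]
        simp only [hpre, Bool.false_eq_true, if_false]
        rw [ih rest (c :: cur) acc (by simpa using Nat.lt_of_succ_lt_succ h)]
        rcases hx : List.splitOnP (fun c => c == '-') rest with _ | ⟨h0, t0⟩
        · exact absurd hx (List.splitOnP_ne_nil _ _)
        · have : (c == '-') = false := by simp [hc]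
          simp [List.splitOnP_cons, hx, this]

lemma pvSplitOn_eq (l : List Char) :
    PySem.Chars.splitOn l ['-'] = List.splitOnP (fun c => c == '-') l := by
  rw [PySem.Chars.splitOn, pvGo (l.length + 1) l [] [] (by omega)]
  rcases hx : List.splitOnP (fun c => c == '-') l with _ | ⟨h0, t0⟩
  · exact absurd hx (List.splitOnP_ne_nil _ _)
  · simp

lemma pvMapA_hyphen (c : Char) : (pvMapA c == '-') = !PySem.Chars.isalnum c := by
  by_cases hc : PySem.Chars.isalnum c = true
  · simp [pvMapA, hc, pvAlnum_ne_hyphen hc]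
  · have hh : PySem.Chars.isalnum '-' = false := by decide
    by_cases hd : c = '-' <;> simp [pvMapA, hc, hd, hh]

lemma pvSplit_map (cs : List Char) :
    List.splitOnP (fun c => c == '-') (cs.map pvMapA) = pvSegs cs := by
  induction cs with
  | nil => simp [pvSegs]
  | cons c cs ih =>
    unfold pvSegs at ih ⊢
    rw [List.map_cons, List.splitOnP_cons, List.splitOnP_cons]
    by_cases hc : PySem.Chars.isalnum c = true
    · have h1 : (pvMapA c == '-') = false := by rw [pvMapA_hyphen, hc]; rfl
      have h2 : pvMapA c = c := by simp [pvMapA, hc]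
      have h3 : (!PySem.Chars.isalnum c) = false := by rw [hc]; rfl
      rw [h1, h3]
      simp only [Bool.false_eq_true, if_false]
      rw [h2, ih]
    · have hcf : PySem.Chars.isalnum c = false := eq_false_of_ne_true hc
      have h1 : (pvMapA c == '-') = true := by rw [pvMapA_hyphen, hcf]; rfl
      have h3 : (!PySem.Chars.isalnum c) = true := by rw [hcf]; rfl
      rw [h1, h3]
      simp only [if_true]
      exact congrArg _ ih

lemma pvIntercalate_cons (t : List (List Char)) (h : List Char) :
    List.intercalate ['-'] (h :: t) = h ++ t.flatMap (fun s => '-' :: s) := by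
  induction t generalizing h with
  | nil => simp [List.intercalate]
  | cons a t ih =>
    have hstep : List.intercalate ['-'] (h :: a :: t) = h ++ ['-'] ++ List.intercalate ['-'] (a :: t) := by
      simp [List.intercalate, List.intersperse]
    rw [hstep, ih a]
    simp

lemma pvInter (ts : List (List Char)) :
    PySem.Chars.join ['-'] (ts.filter (fun p => !p.isEmpty)) = pvG ts := by
  induction ts with
  | nil => simp [PySem.Chars.join, List.intercalate, pvG]
  | cons h t ih =>
    by_cases hh : h.isEmpty
    · simp [pvG, hh]; simpa [hh] using ih
    · simp only [List.filter_cons, hh, Bool.not_false, if_pos]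
      rw [PySem.Chars.join, pvIntercalate_cons]
      simp [pvG, hh, pvFjoin]

lemma pvCore (S : List Char) :
    PySem.Chars.join ['-'] ((PySem.Chars.splitOn (S.map pvMapA) ['-']).filter (fun p => !p.isEmpty)) =
      (if (List.foldl pvStep [] S).getLast? = some '-' then (List.foldl pvStep [] S).dropLast
       else List.foldl pvStep [] S) := by
  rw [pvSplitOn_eq, pvSplit_map, pvInter]
  have hfold : List.foldl pvStep [] S = pvEmit false S := by
    rw [pvFoldl_emit]; simp
  rw [hfold]
  exact ((pvMain S).1).symm

-- ===== VERDICT (by name: the statement is the Claim_ definition above) =====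
theorem get_agent_slug_spec : Claim_equal_get_agent_slug := by
  intro agent _
  unfold Spec_get_agent_slug get_agent_slug get_agent_slug_alt
  by_cases ht : PySem.Dict.getD (PySem.Dict.mk agent) "title" "" = ""
  · simp [ht]
  · simp only [ht, ne_eq, not_false_eq_true, if_pos]
    rw [pvCore]
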